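-- pv_equiv track=rewrite | github.com/oumafreddy/oreno | services/ai/llm_adapter.py | is_safe_prompt
-- ===== SOURCE A (Python) =====
-- SENSITIVE_KEYWORDS = [
--     'list all organizations', 'show all users', 'user emails', 'user list', 'org list', 'tenants', 'database', 'admin', 'superuser',
--     'password', 'api key', 'secret key', 'private data', 'other organizations data',
-- ]
--
-- def is_safe_prompt(prompt: str) -> bool:
--     """Check if the prompt is safe to send to the LLM"""
--     if not prompt or not isinstance(prompt, str):
--         return False
--
--     # Check for sensitive keywords
--     prompt_lower = prompt.lower()
--     for keyword in SENSITIVE_KEYWORDS: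
--         if keyword.lower() in prompt_lower:
--             return False
--
--     return True
-- ===== SOURCE B (Python) =====
-- SENSITIVE_KEYWORDS = [
--     'list all organizations', 'show all users', 'user emails', 'user list', 'org list', 'tenants', 'database', 'admin', 'superuser',
--     'password', 'api key', 'secret key', 'private data', 'other organizations data',
-- ]
--
-- _KEYS = [k.lower() for k in SENSITIVE_KEYWORDS]
--
-- def is_safe_prompt(prompt: str) -> bool:
--     if not prompt or not isinstance(prompt, str):
--         return False
--     p = prompt.lower()
--     # single left-to-right scan: at each position, test whether any keyword starts there
--     for i in range(len(p)):
--         if any(p.startswith(k, i) for k in _KEYS):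
--             return False
--     return True
-- ===== Notes on version B (the rewrite author's own statement) =====
-- stated objective: alternative
-- what changed: Replaces the per-keyword loop of repeated whole-string substring scans with a single left-to-right scan over prompt positions that tests, at each position, whether any pre-lowered keyword starts there.
import Mathlib
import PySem

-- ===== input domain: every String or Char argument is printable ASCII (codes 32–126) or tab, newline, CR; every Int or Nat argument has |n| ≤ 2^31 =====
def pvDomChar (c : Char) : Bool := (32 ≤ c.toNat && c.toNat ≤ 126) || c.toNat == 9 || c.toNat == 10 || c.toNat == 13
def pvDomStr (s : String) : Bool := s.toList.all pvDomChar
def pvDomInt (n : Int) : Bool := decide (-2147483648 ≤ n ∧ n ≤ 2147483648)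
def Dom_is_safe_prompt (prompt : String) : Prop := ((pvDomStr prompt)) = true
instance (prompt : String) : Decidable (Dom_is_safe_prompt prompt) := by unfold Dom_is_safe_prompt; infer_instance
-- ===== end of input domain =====

-- B replaces A's per-keyword substring scans with a single position scan testing keyword prefixes (alternative decomposition; not claimed faster).


def SENSITIVE_KEYWORDS : List String :=
  ["list all organizations", "show all users", "user emails", "user list", "org list", "tenants", "database", "admin", "superuser",
   "password", "api key", "secret key", "private data", "other organizations data"]

-- ===== PORT A =====
-- A's for-loop over keywords with early return False
def isSafeLoopA (keys : List String) (promptLower : String) : Bool :=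
  match keys with
  | [] => true
  | k :: rest =>
    if PySem.Str.isIn (PySem.Str.lower k) promptLower then false
    else isSafeLoopA rest promptLower

def is_safe_prompt (prompt : String) : Bool :=
  if prompt = "" then false
  else
    let promptLower := PySem.Str.lower prompt
    isSafeLoopA SENSITIVE_KEYWORDS promptLower

-- ===== PORT B =====
-- pre-lowered keyword list (module-level _KEYS in Source B)
def pvKEYS : List String := SENSITIVE_KEYWORDS.map (fun k => PySem.Str.lower k)

def is_safe_prompt_alt (prompt : String) : Bool :=
  if prompt = "" then false
  else
    let p := (PySem.Str.lower prompt).toList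
    -- for i in range(len(p)): if any(p.startswith(k, i) for k in _KEYS): return False
    !((List.range p.length).any (fun i =>
        pvKEYS.any (fun k => PySem.Chars.startswith (p.drop i) k.toList)))

-- ===== PRECONDITION & SPEC =====
def Spec_is_safe_prompt (prompt : String) (out : Bool) : Prop := out = is_safe_prompt_alt prompt
instance (prompt : String) (out : Bool) : Decidable (Spec_is_safe_prompt prompt out) := by unfold Spec_is_safe_prompt; infer_instance

-- ===== CLAIM (what is proved, stated in full; the proofs are below) =====
def Claim_equal_is_safe_prompt : Prop := ∀ (prompt : String), Dom_is_safe_prompt prompt → Spec_is_safe_prompt prompt (is_safe_prompt prompt)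

-- ===== LEMMAS AND PROOFS =====

-- A's early-return loop equals the negation of an existence test over keywords
theorem isSafeLoopA_eq (keys : List String) (pl : String) :
    isSafeLoopA keys pl = !(keys.any (fun k => PySem.Str.isIn (PySem.Str.lower k) pl)) := by
  induction keys with
  | nil => rfl
  | cons k rest ih =>
    cases h : PySem.Str.isIn (PySem.Str.lower k) pl with
    | true => simp only [isSafeLoopA, h, if_true, List.any_cons, Bool.true_or, Bool.not_true]
    | false => simp only [isSafeLoopA, h, List.any_cons, Bool.false_or, ih, Bool.false_eq_true, if_false]

-- for a nonempty pattern, "some keyword occurrence" ≡ "prefix at some position i < length"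
theorem range_prefix_eq_isIn (p : List Char) (k : List Char) (hk : k ≠ []) :
    (List.range p.length).any (fun i => PySem.Chars.startswith (p.drop i) k)
      = PySem.Chars.isIn k p := by
  rcases h : PySem.Chars.isIn k p with _ | _
  · simp only [List.any_eq_false, List.mem_range]
    intro i hi
    rw [Bool.not_eq_true, ← Bool.not_eq_true, PySem.Chars.startswith_iff]
    intro hpre
    have : PySem.Chars.isIn k p = true :=
      (PySem.Chars.exists_prefix_drop_iff_isIn k p).1 ⟨i, hpre⟩
    simp [h] at this
  · obtain ⟨j, hj⟩ := (PySem.Chars.exists_prefix_drop_iff_isIn k p).2 h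
    have hjlt : j < p.length := by
      by_contra hge
      have : p.drop j = [] := List.drop_eq_nil_of_le (by omega)
      rw [this] at hj
      exact hk (List.prefix_nil.mp hj)
    simp only [List.any_eq_true, List.mem_range]
    exact ⟨j, hjlt, (PySem.Chars.startswith_iff _ _).2 hj⟩

theorem any_congr_mem {α : Type} (l : List α) (f g : α → Bool)
    (h : ∀ a ∈ l, f a = g a) : l.any f = l.any g := by
  induction l with
  | nil => rfl
  | cons a l ih =>
    simp only [List.any_cons, h a (by simp), ih (fun a ha => h a (by simp [ha]))]

theorem keys_nonempty : ∀ k ∈ pvKEYS, k.toList ≠ [] := by decide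

-- ===== VERDICT (by name: the statement is the Claim_ definition above) =====
theorem is_safe_prompt_spec : Claim_equal_is_safe_prompt := by
  intro prompt _
  unfold Spec_is_safe_prompt is_safe_prompt is_safe_prompt_alt
  by_cases hp : prompt = ""
  · simp [hp]
  · simp only [hp, ite_false]
    rw [isSafeLoopA_eq]
    congr 1
    rw [show (SENSITIVE_KEYWORDS.any (fun k => PySem.Str.isIn (PySem.Str.lower k) (PySem.Str.lower prompt)))
          = pvKEYS.any (fun k => PySem.Str.isIn k (PySem.Str.lower prompt)) by
      simp [pvKEYS, List.any_map, Function.comp_def]]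
    -- swap the two `any`s on B's side, then reduce per keyword
    have swap : ((List.range (PySem.Str.lower prompt).toList.length).any (fun i =>
          pvKEYS.any (fun k => PySem.Chars.startswith ((PySem.Str.lower prompt).toList.drop i) k.toList)))
        = pvKEYS.any (fun k => (List.range (PySem.Str.lower prompt).toList.length).any (fun i =>
            PySem.Chars.startswith ((PySem.Str.lower prompt).toList.drop i) k.toList)) := by
      rw [Bool.eq_iff_iff]
      simp only [List.any_eq_true]
      constructor
      · rintro ⟨i, hi, k, hk, h⟩; exact ⟨k, hk, i, hi, h⟩
      · rintro ⟨k, hk, i, hi, h⟩; exact ⟨i, hi, k, hk, h⟩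
    rw [swap]
    apply any_congr_mem
    intro k hk
    rw [range_prefix_eq_isIn _ _ (keys_nonempty k hk)]
    simp [PySem.Str.isIn]
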